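-- pv_equiv track=rewrite | github.com/chinhung82/etl-framework | src/transformers/cleaner.py | generate_mapping_case_statement
-- ===== SOURCE A (Python) =====
-- from collections import defaultdict
--
-- def generate_mapping_case_statement(mapping_dict,
--                                 source_column,
--                                 target_column,
--                                 coalesce_columns=None):
--     """
--     Generic function to generate CASE statement for any mapping
--
--     Args:
--         mapping_dict: Dictionary of source -> target mappings
--         source_column: Name of source column
--         target_column: Name of target column
--         coalesce_columns: List of columns to COALESCE (e.g., ["CountryCode", "Country"])
--         indent: Indentation spaces
--
--     Returns:
--         str: SQL CASE statement
--     """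
--     # Group mappings by target value
--     target_to_sources = defaultdict(list)
--     for source, target in mapping_dict.items():
--         target_to_sources[target].append(source)
--
--     # Build column reference
--     if coalesce_columns:
--         col_ref = f"UPPER(COALESCE({', '.join(coalesce_columns)}))"
--     else:
--         col_ref = f"UPPER({source_column})"
--
--     # Build CASE statement
--     lines = ["CASE"]
--
--     for target_value in sorted(target_to_sources.keys()):
--         sources = target_to_sources[target_value]
--         upper_sources = [s.upper() for s in sources]
--
--         if len(upper_sources) == 1:
--             lines.append(f" WHEN {col_ref} = '{upper_sources[0]}'")
--             lines.append(f" THEN '{target_value}'")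
--         else:
--             sources_list = ", ".join([f"'{s}'" for s in upper_sources])
--             lines.append(f" WHEN {col_ref} IN ({sources_list})")
--             lines.append(f" THEN '{target_value}'")
--
--     lines.append(f" ELSE {target_column}")
--     lines.append(f" END AS {target_column}")
--
--     return "\n".join(lines)
-- ===== SOURCE B (Python) =====
-- from itertools import groupby
--
--
-- def generate_mapping_case_statement(mapping_dict,
--                                 source_column,
--                                 target_column,
--                                 coalesce_columns=None):
--     if coalesce_columns:
--         col_ref = f"UPPER(COALESCE({', '.join(coalesce_columns)}))"
--     else:
--         col_ref = f"UPPER({source_column})"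
--     body = ""
--     items = sorted(mapping_dict.items(), key=lambda kv: kv[1])
--     for target, group in groupby(items, key=lambda kv: kv[1]):
--         quoted = ["'" + source.upper() + "'" for source, _ in group]
--         if len(quoted) == 1:
--             cond = "= " + quoted[0]
--         else:
--             cond = "IN (" + ", ".join(quoted) + ")"
--         body += f"\n WHEN {col_ref} {cond}\n THEN '{target}'"
--     return f"CASE{body}\n ELSE {target_column}\n END AS {target_column}"
-- ===== Notes on version B (the rewrite author's own statement) =====
-- stated objective: idiomatic
-- what changed: Replaces the defaultdict-grouping pass followed by sorting the dict keys with a single stable sort of the items by target value plus itertools.groupby, accumulating the CASE body as one string instead of a list of lines.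
import Mathlib
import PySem

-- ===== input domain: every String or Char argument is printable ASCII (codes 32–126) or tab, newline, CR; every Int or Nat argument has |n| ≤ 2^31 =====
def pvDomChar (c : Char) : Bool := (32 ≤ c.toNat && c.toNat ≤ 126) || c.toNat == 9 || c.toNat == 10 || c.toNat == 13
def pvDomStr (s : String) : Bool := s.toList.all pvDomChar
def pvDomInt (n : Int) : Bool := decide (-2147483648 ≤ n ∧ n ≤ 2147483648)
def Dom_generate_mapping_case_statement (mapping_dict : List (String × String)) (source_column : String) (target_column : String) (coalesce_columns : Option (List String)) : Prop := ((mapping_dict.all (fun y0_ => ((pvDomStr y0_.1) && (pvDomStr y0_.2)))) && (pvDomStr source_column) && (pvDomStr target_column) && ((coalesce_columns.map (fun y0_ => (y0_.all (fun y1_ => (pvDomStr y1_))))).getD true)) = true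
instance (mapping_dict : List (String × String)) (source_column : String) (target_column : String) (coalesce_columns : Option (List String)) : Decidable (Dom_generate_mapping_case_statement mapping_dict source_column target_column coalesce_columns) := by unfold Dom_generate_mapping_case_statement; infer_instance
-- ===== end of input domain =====

-- One honest line: B replaces A's defaultdict-grouping + sorted-keys passes by one stable
-- sort of the items by target plus adjacent-run grouping, building the body as one string.

-- ===== PORT A =====
def generate_mapping_case_statement (mapping_dict : List (String × String)) (source_column : String) (target_column : String) (coalesce_columns : Option (List String)) : String :=
  -- target_to_sources = defaultdict(list); for source, target in mapping_dict.items(): target_to_sources[target].append(source)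
  let target_to_sources : PySem.Dict String (List String) :=
    mapping_dict.foldl (fun d p => d.modify p.2 [] (fun v => v ++ [p.1])) PySem.Dict.empty
  -- if coalesce_columns: … (Python truthiness: None and [] are falsy)
  let col_ref : String :=
    match coalesce_columns with
    | some (c :: cs) => "UPPER(COALESCE(" ++ PySem.Str.join ", " (c :: cs) ++ "))"
    | _ => "UPPER(" ++ source_column ++ ")"
  let lines : List String :=
    (PySem.List.sorted target_to_sources.keys (fun x => x) false).foldl (fun lines target_value =>
      let sources := target_to_sources.getD target_value []
      let upper_sources := sources.map PySem.Str.upper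
      -- `if len(upper_sources) == 1: … upper_sources[0] …` ported as a one-element match (exact: the index is 0)
      match upper_sources with
      | [u] =>
          lines ++ [" WHEN " ++ col_ref ++ " = '" ++ u ++ "'", " THEN '" ++ target_value ++ "'"]
      | us =>
          let sources_list := PySem.Str.join ", " (us.map (fun s => "'" ++ s ++ "'"))
          lines ++ [" WHEN " ++ col_ref ++ " IN (" ++ sources_list ++ ")", " THEN '" ++ target_value ++ "'"])
      ["CASE"]
  PySem.Str.join "\n" (lines ++ [" ELSE " ++ target_column, " END AS " ++ target_column])

-- ===== PORT B =====
-- hand port of itertools.groupby over pairs keyed by the second component, collecting the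
-- first components of each adjacent run (exact for any list; grouping merges adjacent equal keys)
def pvGroupRuns : List (String × String) → List (String × List String)
  | [] => []
  | (s, t) :: rest =>
    match pvGroupRuns rest with
    | (t', ss) :: gs => if t' = t then (t, s :: ss) :: gs else (t, [s]) :: (t', ss) :: gs
    | [] => [(t, [s])]

def generate_mapping_case_statement_alt (mapping_dict : List (String × String)) (source_column : String) (target_column : String) (coalesce_columns : Option (List String)) : String :=
  let col_ref : String :=
    match coalesce_columns with
    | none => "UPPER(" ++ source_column ++ ")"
    | some [] => "UPPER(" ++ source_column ++ ")"
    | some (c :: cs) => "UPPER(COALESCE(" ++ PySem.Str.join ", " (c :: cs) ++ "))"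
  let items := PySem.List.sorted mapping_dict (fun kv => kv.2) false
  let body : String :=
    (pvGroupRuns items).foldl (fun body g =>
      let quoted := g.2.map (fun source => "'" ++ PySem.Str.upper source ++ "'")
      let cond : String :=
        if quoted.length == 1 then "= " ++ quoted.headD ""
        else "IN (" ++ PySem.Str.join ", " quoted ++ ")"
      body ++ ("\n WHEN " ++ col_ref ++ " " ++ cond ++ "\n THEN '" ++ g.1 ++ "'")) ""
  "CASE" ++ body ++ ("\n ELSE " ++ target_column ++ ("\n END AS " ++ target_column))

-- ===== PRECONDITION & SPEC =====
def Spec_generate_mapping_case_statement (mapping_dict : List (String × String)) (source_column : String) (target_column : String) (coalesce_columns : Option (List String)) (out : String) : Prop := out = generate_mapping_case_statement_alt mapping_dict source_column target_column coalesce_columns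
instance (mapping_dict : List (String × String)) (source_column : String) (target_column : String) (coalesce_columns : Option (List String)) (out : String) : Decidable (Spec_generate_mapping_case_statement mapping_dict source_column target_column coalesce_columns out) := by unfold Spec_generate_mapping_case_statement; infer_instance

-- ===== CLAIM (what is proved, stated in full; the proofs are below) =====
def Claim_equal_generate_mapping_case_statement : Prop := ∀ (mapping_dict : List (String × String)) (source_column : String) (target_column : String) (coalesce_columns : Option (List String)), Dom_generate_mapping_case_statement mapping_dict source_column target_column coalesce_columns → Spec_generate_mapping_case_statement mapping_dict source_column target_column coalesce_columns (generate_mapping_case_statement mapping_dict source_column target_column coalesce_columns)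

-- ===== LEMMAS AND PROOFS =====

lemma pv_insertBy_filter (t : String) (x : String × String) :
    ∀ ys : List (String × String), List.Pairwise (fun a b => a.2 ≤ b.2) ys →
    List.filter (fun p => p.2 == t) (PySem.List.insertBy (fun a b => decide (a.2 < b.2)) x ys)
      = if x.2 == t then List.filter (fun p => p.2 == t) ys ++ [x]
        else List.filter (fun p => p.2 == t) ys
  | [], _ => by
    by_cases hx : x.2 == t <;> simp [PySem.List.insertBy, List.filter, hx]
  | y :: ys, hp => by
    rw [List.pairwise_cons] at hp
    by_cases h : x.2 < y.2
    · rw [show PySem.List.insertBy (fun a b => decide (a.2 < b.2)) x (y :: ys)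
            = x :: y :: ys by rw [PySem.List.insertBy]; simp [h]]
      by_cases hx : x.2 == t
      · have hxt : x.2 = t := by simpa using hx
        have hnil : List.filter (fun p => p.2 == t) (y :: ys) = [] := by
          rw [List.filter_eq_nil_iff]
          intro p hpmem
          have h1 : y.2 ≤ p.2 := by
            rcases List.mem_cons.mp hpmem with h' | h'
            · exact h' ▸ le_refl _
            · exact hp.1 _ h'
          have h2 : t < p.2 := lt_of_lt_of_le (hxt ▸ h) h1
          simp [ne_of_gt h2]
        rw [List.filter_cons_of_pos (by exact hx), hnil, if_pos hx]
        simp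
      · rw [List.filter_cons_of_neg (by simpa using hx), if_neg hx]
    · rw [show PySem.List.insertBy (fun a b => decide (a.2 < b.2)) x (y :: ys)
            = y :: PySem.List.insertBy (fun a b => decide (a.2 < b.2)) x ys by
          rw [PySem.List.insertBy]; simp [h]]
      have ih := pv_insertBy_filter t x ys hp.2
      by_cases hy : y.2 == t
      · rw [List.filter_cons_of_pos (by exact hy), List.filter_cons_of_pos (by exact hy), ih]
        split_ifs <;> simp
      · rw [List.filter_cons_of_neg (by simpa using hy), List.filter_cons_of_neg (by simpa using hy), ih]

lemma pv_sorted_filter (t : String) (l : List (String × String)) :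
    List.filter (fun p => p.2 == t) (PySem.List.sorted l (fun p => p.2) false)
      = List.filter (fun p => p.2 == t) l := by
  induction l using List.reverseRecOn with
  | nil => rw [PySem.List.sorted_eq_foldl_insertBy]; rfl
  | append_singleton l x ih =>
    rw [PySem.List.sorted_eq_foldl_insertBy, List.foldl_append, List.foldl_cons, List.foldl_nil,
        ← PySem.List.sorted_eq_foldl_insertBy]
    rw [pv_insertBy_filter t x _ (PySem.List.sorted_pairwise l (fun p => p.2)), List.filter_append]
    by_cases hx : x.2 == t
    · rw [if_pos hx, ih, List.filter_cons_of_pos (by exact hx), List.filter_nil]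
    · rw [if_neg hx, ih, List.filter_cons_of_neg (by simpa using hx), List.filter_nil, List.append_nil]

def pvSrc (l : List (String × String)) (t : String) : List String :=
  (l.filter (fun p => p.2 == t)).map Prod.fst

lemma pv_dict_getD (l : List (String × String)) (t : String) :
    (l.foldl (fun d p => d.modify p.2 [] (fun v => v ++ [p.1])) PySem.Dict.empty).getD t []
      = pvSrc l t := by
  have h := PySem.Dict.getD_foldl_modify_append (l.map (fun p => (p.2, p.1))) PySem.Dict.empty t
  rw [List.foldl_map] at h
  simpa [pvSrc, List.filter_map, Function.comp, List.map_map] using h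

lemma pv_dict_keys (l : List (String × String)) :
    (l.foldl (fun d p => d.modify p.2 [] (fun v => v ++ [p.1])) PySem.Dict.empty).keys
      = PySem.List.dedup (l.map (fun p => p.2)) := by
  have h := PySem.Dict.keys_foldl_modify_key l (fun p => p.2) []
      (fun _ p => fun v => v ++ [p.1]) PySem.Dict.empty
  simpa [PySem.List.dedup, PySem.Set.ofList, PySem.Set.update] using h

lemma pv_groupRuns_eq_nil (xs : List (String × String)) :
    pvGroupRuns xs = [] ↔ xs = [] := by
  cases xs with
  | nil => simp [pvGroupRuns]
  | cons p rest =>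
    obtain ⟨s, t⟩ := p
    simp only [pvGroupRuns]
    cases h : pvGroupRuns rest with
    | nil => simp
    | cons g gs => obtain ⟨t', ss⟩ := g; by_cases ht : t' = t <;> simp [ht]

lemma pv_groupRuns_cons (s t : String) (rest : List (String × String)) :
    ∃ ss gs, pvGroupRuns ((s, t) :: rest) = (t, ss) :: gs := by
  simp only [pvGroupRuns]
  cases h : pvGroupRuns rest with
  | nil => exact ⟨[s], [], rfl⟩
  | cons g gs =>
    obtain ⟨t', ss⟩ := g
    by_cases ht : t' = t
    · subst ht; exact ⟨s :: ss, gs, by simp⟩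
    · simp only [if_neg ht]; exact ⟨[s], (t', ss) :: gs, rfl⟩

lemma pv_groupRuns_mem_keys (xs : List (String × String)) (t : String) :
    t ∈ (pvGroupRuns xs).map Prod.fst ↔ t ∈ xs.map Prod.snd := by
  induction xs with
  | nil => simp [pvGroupRuns]
  | cons p rest ih =>
    obtain ⟨s, t0⟩ := p
    simp only [pvGroupRuns]
    cases h : pvGroupRuns rest with
    | nil =>
      have : rest = [] := (pv_groupRuns_eq_nil rest).mp h
      subst this; simp
    | cons g gs =>
      obtain ⟨t', ss⟩ := g
      rw [h] at ih
      by_cases ht : t' = t0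
      · subst ht
        simp only [List.map_cons, List.mem_cons] at ih
        simp only [List.map_cons, List.mem_cons, if_pos]
        tauto
      · simp only [List.map_cons, List.mem_cons] at ih
        simp only [List.map_cons, List.mem_cons, if_neg ht]
        tauto

lemma pv_groupRuns_cons_eq (s t0 : String) (rest : List (String × String)) (t' : String)
    (ss : List String) (gs : List (String × List String)) (h : pvGroupRuns rest = (t', ss) :: gs) :
    pvGroupRuns ((s, t0) :: rest)
      = if t' = t0 then (t0, s :: ss) :: gs else (t0, [s]) :: (t', ss) :: gs := by
  simp only [pvGroupRuns, h]

lemma pv_groupRuns_head_key (q : String × String) (rest' : List (String × String))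
    {t' : String} {ss : List String} {gs : List (String × List String)}
    (h : pvGroupRuns (q :: rest') = (t', ss) :: gs) : t' = q.2 := by
  obtain ⟨s, t⟩ := q
  obtain ⟨ss', gs', h'⟩ := pv_groupRuns_cons s t rest'
  rw [h'] at h
  injection h with h1 _
  injection h1 with h2 _
  exact h2.symm

lemma pv_groupRuns_keys_pairwise : ∀ xs : List (String × String),
    List.Pairwise (fun a b => a.2 ≤ b.2) xs →
    List.Pairwise (· < ·) ((pvGroupRuns xs).map Prod.fst)
  | [], _ => by simp [pvGroupRuns]
  | (s, t0) :: rest, hp => by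
    rw [List.pairwise_cons] at hp
    have ih := pv_groupRuns_keys_pairwise rest hp.2
    cases hr : pvGroupRuns rest with
    | nil =>
      have h0 : rest = [] := (pv_groupRuns_eq_nil rest).mp hr
      subst h0
      simp [pvGroupRuns]
    | cons g gs =>
      obtain ⟨t', ss⟩ := g
      have hrest_ne : rest ≠ [] := by
        intro h0; rw [h0] at hr; simp [pvGroupRuns] at hr
      obtain ⟨q, rest', rfl⟩ := List.exists_cons_of_ne_nil hrest_ne
      have ht' : t' = q.2 := pv_groupRuns_head_key q rest' hr
      rw [pv_groupRuns_cons_eq s t0 _ t' ss gs hr]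
      rw [hr] at ih
      have hle : t0 ≤ t' := by
        have := hp.1 q List.mem_cons_self
        rw [ht']; exact this
      by_cases hm : t' = t0
      · rw [if_pos hm]
        simp only [List.map_cons] at ih ⊢
        rw [← hm]
        exact ih
      · rw [if_neg hm]
        simp only [List.map_cons] at ih ⊢
        refine List.Pairwise.cons ?_ ih
        intro u hu
        rcases List.mem_cons.mp hu with rfl | hu'
        · exact lt_of_le_of_ne hle (fun h => hm h.symm)
        · exact lt_of_le_of_lt hle ((List.pairwise_cons.mp ih).1 u hu')

lemma pv_groupRuns_val : ∀ xs : List (String × String),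
    List.Pairwise (fun a b => a.2 ≤ b.2) xs →
    ∀ g ∈ pvGroupRuns xs, g.2 = (xs.filter (fun p => p.2 == g.1)).map Prod.fst
  | [], _ => by simp [pvGroupRuns]
  | (s, t0) :: rest, hp => by
    rw [List.pairwise_cons] at hp
    have ih := pv_groupRuns_val rest hp.2
    intro g hg
    cases hr : pvGroupRuns rest with
    | nil =>
      have h0 : rest = [] := (pv_groupRuns_eq_nil rest).mp hr
      subst h0
      simp only [pvGroupRuns, List.mem_singleton] at hg
      subst hg
      simp [List.filter]
    | cons g0 gs =>
      obtain ⟨t', ss⟩ := g0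
      have hrest_ne : rest ≠ [] := by
        intro h0; rw [h0] at hr; simp [pvGroupRuns] at hr
      obtain ⟨q, rest', rfl⟩ := List.exists_cons_of_ne_nil hrest_ne
      have ht' : t' = q.2 := pv_groupRuns_head_key q rest' hr
      have hkeys := pv_groupRuns_keys_pairwise _ hp.2
      rw [hr] at hkeys ih
      rw [pv_groupRuns_cons_eq s t0 _ t' ss gs hr] at hg
      have hle : t0 ≤ t' := by
        have := hp.1 q List.mem_cons_self
        rw [ht']; exact this
      simp only [List.map_cons] at hkeys
      by_cases hm : t' = t0
      · rw [if_pos hm] at hg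
        rcases List.mem_cons.mp hg with rfl | hg'
        · have h1 := ih (t', ss) List.mem_cons_self
          simp only at h1 ⊢
          rw [List.filter_cons_of_pos (by simp), List.map_cons, h1, hm]
        · have hne : ((s, t0).2 == g.1) ≠ true := by
            have hmem : g.1 ∈ gs.map Prod.fst := List.mem_map.mpr ⟨g, hg', rfl⟩
            have hlt : t' < g.1 := (List.pairwise_cons.mp hkeys).1 _ hmem
            rw [hm] at hlt
            simp [ne_of_lt hlt]
          rw [show List.filter (fun p => p.2 == g.1) ((s, t0) :: q :: rest')
                = List.filter (fun p => p.2 == g.1) (q :: rest') from List.filter_cons_of_neg hne]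
          exact ih g (List.mem_cons_of_mem _ hg')
      · rw [if_neg hm] at hg
        rcases List.mem_cons.mp hg with rfl | hg'
        · simp only
          rw [List.filter_cons_of_pos (by simp)]
          have hnil : List.filter (fun p => p.2 == t0) (q :: rest') = [] := by
            rw [List.filter_eq_nil_iff]
            intro p hpmem
            have h1 : q.2 ≤ p.2 := by
              rcases List.mem_cons.mp hpmem with rfl | h'
              · exact le_refl _
              · exact (List.pairwise_cons.mp hp.2).1 _ h'
            have h2 : t0 ≤ q.2 := ht' ▸ hle
            intro hpc
            have hpt : p.2 = t0 := by simpa using hpc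
            have : q.2 = t0 := le_antisymm (hpt ▸ h1) h2
            exact hm (ht'.trans this)
          rw [hnil]
          simp
        · have h1 := ih g hg'
          have hne : ((s, t0).2 == g.1) ≠ true := by
            have hmem : g.1 ∈ t' :: gs.map Prod.fst := by
              rcases List.mem_cons.mp hg' with rfl | h'
              · exact List.mem_cons_self
              · exact List.mem_cons_of_mem _ (List.mem_map.mpr ⟨g, h', rfl⟩)
            have h2 : t0 ≠ g.1 := by
              rcases List.mem_cons.mp hmem with rfl | h'
              · exact fun h => hm h.symm
              · have hlt : t' < g.1 := (List.pairwise_cons.mp hkeys).1 _ h'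
                exact ne_of_lt (lt_of_le_of_lt hle hlt)
            simp [h2]
          rw [show List.filter (fun p => p.2 == g.1) ((s, t0) :: q :: rest')
                = List.filter (fun p => p.2 == g.1) (q :: rest') from List.filter_cons_of_neg hne]
          exact h1

lemma pv_foldl_pull {α : Type} (f : α → String) :
    ∀ (ys : List α) (c a : String),
    c ++ ys.foldl (fun b g => b ++ f g) a = ys.foldl (fun b g => b ++ f g) (c ++ a)
  | [], c, a => by simp
  | y :: ys, c, a => by
    simp only [List.foldl_cons]
    rw [pv_foldl_pull f ys c (a ++ f y), String.append_assoc]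

lemma pv_join_cons (sep : String) :
    ∀ (ys : List String) (x : String),
    PySem.Str.join sep (x :: ys) = ys.foldl (fun a y => a ++ (sep ++ y)) x
  | [], x => by
    simp [PySem.Str.join, PySem.Chars.join_singleton]
  | y :: ys, x => by
    have h : PySem.Str.join sep (x :: y :: ys) = x ++ sep ++ PySem.Str.join sep (y :: ys) := by
      simp [PySem.Str.join, PySem.Chars.join_cons_cons, String.ofList_append, String.append_assoc]
    rw [h, pv_join_cons sep ys y, pv_foldl_pull (fun g => sep ++ g) ys (x ++ sep) y,
        List.foldl_cons, String.append_assoc]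

lemma pv_foldl_flat {α : Type} (w h : α → String) :
    ∀ (gs : List α) (x : String),
    (gs.flatMap (fun g => [w g, h g])).foldl (fun a y => a ++ ("\n" ++ y)) x
      = gs.foldl (fun a g => a ++ (("\n" ++ w g) ++ ("\n" ++ h g))) x
  | [], x => by simp
  | g :: gs, x => by
    simp only [List.flatMap_cons, List.foldl_append, List.foldl_cons, List.foldl_nil]
    rw [pv_foldl_flat w h gs, String.append_assoc]

lemma pv_lit (a b c : String) (h : a ++ b = c) (x : String) : a ++ (b ++ x) = c ++ x := by
  rw [← String.append_assoc, h]

lemma pv_chunk3 (x tc : String) :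
    x ++ ("\n" ++ (" ELSE " ++ tc)) ++ ("\n" ++ (" END AS " ++ tc))
      = x ++ ("\n ELSE " ++ tc ++ ("\n END AS " ++ tc)) := by
  simp only [String.append_assoc]
  rw [pv_lit "\n" " ELSE " "\n ELSE " (by decide)]
  rw [pv_lit "\n" " END AS " "\n END AS " (by decide)]

lemma pv_sorted_keys (l : List (String × String)) :
    PySem.List.sorted (PySem.List.dedup (l.map (fun p => p.2))) (fun x => x) false
      = (pvGroupRuns (PySem.List.sorted l (fun p => p.2) false)).map Prod.fst := by
  apply PySem.List.sorted_eq_of_perm_of_pairwise_lt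
  · rw [List.perm_ext_iff_of_nodup
      ((pv_groupRuns_keys_pairwise _ (PySem.List.sorted_pairwise l (fun p => p.2))).imp ne_of_lt)
      (PySem.List.nodup_dedup _)]
    intro a
    rw [pv_groupRuns_mem_keys, PySem.List.mem_dedup]
    exact List.Perm.mem_iff ((PySem.List.sorted_perm l (fun p => p.2) false).map Prod.snd)
  · exact pv_groupRuns_keys_pairwise _ (PySem.List.sorted_pairwise l (fun p => p.2))

lemma pv_eqline (cr u : String) :
    " WHEN " ++ cr ++ " = '" ++ u ++ "'" = " WHEN " ++ cr ++ " " ++ ("= " ++ ("'" ++ u ++ "'")) := by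
  simp only [String.append_assoc]
  rw [pv_lit " " "= " " = " (by decide), pv_lit " = " "'" " = '" (by decide)]

lemma pv_inline (cr j : String) :
    " WHEN " ++ cr ++ " IN (" ++ j ++ ")" = " WHEN " ++ cr ++ " " ++ ("IN (" ++ j ++ ")") := by
  simp only [String.append_assoc]
  rw [pv_lit " " "IN (" " IN (" (by decide)]

lemma pv_chunkW (cr c t : String) :
    ("\n" ++ (" WHEN " ++ cr ++ " " ++ c)) ++ ("\n" ++ (" THEN '" ++ t ++ "'"))
      = "\n WHEN " ++ cr ++ " " ++ c ++ "\n THEN '" ++ t ++ "'" := by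
  simp only [String.append_assoc]
  rw [pv_lit "\n" " WHEN " "\n WHEN " (by decide), pv_lit "\n" " THEN '" "\n THEN '" (by decide)]

lemma pv_assemble (gs : List (String × List String)) (cr tc : String) :
    PySem.Str.join "\n"
      ((gs.foldl (fun lines g =>
          match g.2.map PySem.Str.upper with
          | [u] => lines ++ [" WHEN " ++ cr ++ " = '" ++ u ++ "'", " THEN '" ++ g.1 ++ "'"]
          | us => lines ++ [" WHEN " ++ cr ++ " IN ("
                    ++ PySem.Str.join ", " (us.map (fun s => "'" ++ s ++ "'")) ++ ")",
                  " THEN '" ++ g.1 ++ "'"]) ["CASE"])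
        ++ [" ELSE " ++ tc, " END AS " ++ tc])
    = "CASE" ++ (gs.foldl (fun body g =>
          body ++ ("\n WHEN " ++ cr ++ " "
            ++ (if (g.2.map (fun s => "'" ++ PySem.Str.upper s ++ "'")).length == 1
                then "= " ++ (g.2.map (fun s => "'" ++ PySem.Str.upper s ++ "'")).headD ""
                else "IN (" ++ PySem.Str.join ", " (g.2.map (fun s => "'" ++ PySem.Str.upper s ++ "'")) ++ ")")
            ++ "\n THEN '" ++ g.1 ++ "'")) "")
        ++ ("\n ELSE " ++ tc ++ ("\n END AS " ++ tc)) := by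
  set C : (String × List String) → String := fun g =>
    if (g.2.map (fun s => "'" ++ PySem.Str.upper s ++ "'")).length == 1
    then "= " ++ (g.2.map (fun s => "'" ++ PySem.Str.upper s ++ "'")).headD ""
    else "IN (" ++ PySem.Str.join ", " (g.2.map (fun s => "'" ++ PySem.Str.upper s ++ "'")) ++ ")" with hCdef
  set W : (String × List String) → String := fun g => " WHEN " ++ cr ++ " " ++ C g with hW
  set H : (String × List String) → String := fun g => " THEN '" ++ g.1 ++ "'" with hH
  have hA : (fun (lines : List String) (g : String × List String) =>
      match g.2.map PySem.Str.upper with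
      | [u] => lines ++ [" WHEN " ++ cr ++ " = '" ++ u ++ "'", " THEN '" ++ g.1 ++ "'"]
      | us => lines ++ [" WHEN " ++ cr ++ " IN ("
                ++ PySem.Str.join ", " (us.map (fun s => "'" ++ s ++ "'")) ++ ")",
              " THEN '" ++ g.1 ++ "'"])
      = fun lines g => lines ++ [W g, H g] := by
    funext lines g
    rcases g with ⟨t, ss⟩
    rcases ss with _ | ⟨s0, _ | ⟨s1, rest⟩⟩
    · simp only [hW, hH, hCdef, List.map_nil]
      rw [pv_inline cr _]
      rfl
    · simp only [hW, hH, hCdef, List.map_cons, List.map_nil]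
      rw [pv_eqline cr (PySem.Str.upper s0)]
      rfl
    · simp only [hW, hH, hCdef, List.map_cons]
      rw [show List.map (fun s => "'" ++ s ++ "'") (List.map PySem.Str.upper rest)
            = rest.map (fun s => "'" ++ PySem.Str.upper s ++ "'") by
          simp [List.map_map, Function.comp]]
      rw [pv_inline cr _]
      rfl
  have hBf : (fun (body : String) (g : String × List String) =>
      body ++ ("\n WHEN " ++ cr ++ " "
        ++ (if (g.2.map (fun s => "'" ++ PySem.Str.upper s ++ "'")).length == 1
            then "= " ++ (g.2.map (fun s => "'" ++ PySem.Str.upper s ++ "'")).headD ""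
            else "IN (" ++ PySem.Str.join ", " (g.2.map (fun s => "'" ++ PySem.Str.upper s ++ "'")) ++ ")")
        ++ "\n THEN '" ++ g.1 ++ "'"))
      = fun body g => body ++ (("\n" ++ W g) ++ ("\n" ++ H g)) := by
    funext b g
    simp only [hW, hH, hCdef]
    rw [pv_chunkW cr _ g.1]
  rw [hA, PySem.List.foldl_append_eq_flatMap (fun g => [W g, H g]) gs ["CASE"],
      List.singleton_append, List.cons_append, pv_join_cons, List.foldl_append, pv_foldl_flat,
      List.foldl_cons, List.foldl_cons, List.foldl_nil]
  rw [hBf, pv_foldl_pull (fun g => ("\n" ++ W g) ++ ("\n" ++ H g)) gs "CASE" "",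
      String.append_empty]
  exact pv_chunk3 _ tc

lemma pv_colref (sc : String) (cc : Option (List String)) :
    (match cc with
      | none => "UPPER(" ++ sc ++ ")"
      | some [] => "UPPER(" ++ sc ++ ")"
      | some (c :: cs) => "UPPER(COALESCE(" ++ PySem.Str.join ", " (c :: cs) ++ "))")
    = (match cc with
      | some (c :: cs) => "UPPER(COALESCE(" ++ PySem.Str.join ", " (c :: cs) ++ "))"
      | _ => "UPPER(" ++ sc ++ ")") := by
  rcases cc with _ | (_ | ⟨c, cs⟩) <;> rfl

lemma pv_main (l : List (String × String)) (sc tc : String) (cc : Option (List String)) :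
    generate_mapping_case_statement l sc tc cc = generate_mapping_case_statement_alt l sc tc cc := by
  unfold generate_mapping_case_statement generate_mapping_case_statement_alt
  simp only [pv_dict_getD, pv_dict_keys, pv_sorted_keys, List.foldl_map, pv_colref]
  rw [PySem.List.foldl_congr_mem _ _
      (fun lines (g : String × List String) =>
        match g.2.map PySem.Str.upper with
        | [u] => lines ++ [" WHEN " ++ (match cc with
                    | some (c :: cs) => "UPPER(COALESCE(" ++ PySem.Str.join ", " (c :: cs) ++ "))"
                    | _ => "UPPER(" ++ sc ++ ")") ++ " = '" ++ u ++ "'", " THEN '" ++ g.1 ++ "'"]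
        | us => lines ++ [" WHEN " ++ (match cc with
                    | some (c :: cs) => "UPPER(COALESCE(" ++ PySem.Str.join ", " (c :: cs) ++ "))"
                    | _ => "UPPER(" ++ sc ++ ")") ++ " IN ("
                  ++ PySem.Str.join ", " (us.map (fun s => "'" ++ s ++ "'")) ++ ")",
                " THEN '" ++ g.1 ++ "'"]) _ ?_]
  · exact pv_assemble _ _ tc
  · intro acc g hg
    have hv : g.2 = pvSrc l g.1 := by
      rw [pv_groupRuns_val _ (PySem.List.sorted_pairwise l (fun p => p.2)) g hg, pvSrc,
          pv_sorted_filter]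
    rw [← hv]

-- ===== VERDICT (by name: the statement is the Claim_ definition above) =====
theorem generate_mapping_case_statement_spec : Claim_equal_generate_mapping_case_statement := by
  intro l sc tc cc _
  unfold Spec_generate_mapping_case_statement
  exact pv_main l sc tc cc
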